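-- pv_equiv track=rewrite | github.com/kit-developer/AugmentPlot | test.py | get_attr_tree_reverse
-- ===== SOURCE A (Python) =====
-- def get_attr_tree_reverse(attr_tree):
--     attr_tree_reverse = {}
--     for g_attr, g_attr_groups in attr_tree.items():
--         for l_attrs in g_attr_groups:
--             for l_attr in l_attrs:
--                 if l_attr not in attr_tree_reverse:
--                     attr_tree_reverse[l_attr] = {g_attr: 1}
--                 else:
--                     if g_attr not in attr_tree_reverse[l_attr]:
--                         attr_tree_reverse[l_attr].update({g_attr: 1})
--                     else:
--                         attr_tree_reverse[l_attr][g_attr] += 1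
--     return attr_tree_reverse
-- ===== SOURCE B (Python) =====
-- def get_attr_tree_reverse(attr_tree):
--     pairs = [(l, g) for g, groups in attr_tree.items() for ls in groups for l in ls]
--     counts = {}
--     for p in pairs:
--         counts[p] = counts.get(p, 0) + 1
--     result = {}
--     for (l, g), c in counts.items():
--         result.setdefault(l, {})[g] = c
--     return result
-- ===== Notes on version B (the rewrite author's own statement) =====
-- stated objective: alternative
-- what changed: A accumulates the nested count dict in one interleaved pass with three explicit branch cases per element; B first flattens the tree into a list of (l_attr, g_attr) pairs and counts them in a flat dict keyed by the pair, then regroups that flat counter into the nested result in a second pass via setdefault.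
import Mathlib
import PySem

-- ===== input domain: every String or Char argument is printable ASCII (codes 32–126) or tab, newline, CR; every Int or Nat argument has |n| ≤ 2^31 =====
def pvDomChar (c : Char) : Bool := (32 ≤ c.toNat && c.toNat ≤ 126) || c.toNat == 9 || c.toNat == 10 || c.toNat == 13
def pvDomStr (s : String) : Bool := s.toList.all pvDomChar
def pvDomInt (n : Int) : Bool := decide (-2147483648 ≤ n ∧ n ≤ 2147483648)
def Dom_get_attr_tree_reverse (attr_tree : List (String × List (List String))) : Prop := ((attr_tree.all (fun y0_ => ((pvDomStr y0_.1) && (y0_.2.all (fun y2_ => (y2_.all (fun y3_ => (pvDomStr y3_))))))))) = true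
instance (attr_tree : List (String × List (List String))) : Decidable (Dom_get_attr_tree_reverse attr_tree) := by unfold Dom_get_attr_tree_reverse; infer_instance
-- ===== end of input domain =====

-- B flattens the tree to (l_attr, g_attr) pairs, counts them in a flat dict, then regroups that
-- flat counter into the nested result, instead of A's interleaved three-branch nested-dict pass;
-- objective: alternative (same cost).

-- ===== PORT A =====
def get_attr_tree_reverse (attr_tree : List (String × List (List String))) : List (String × List (String × Int)) :=
  let d : PySem.Dict String (PySem.Dict String Int) :=
    attr_tree.foldl (fun d gp =>
      gp.2.foldl (fun d l_attrs =>
        l_attrs.foldl (fun d l =>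
          if d.contains l = false then
            d.insert l (PySem.Dict.empty.insert gp.1 1)
          else
            let inner := d.getD l PySem.Dict.empty
            if inner.contains gp.1 = false then
              d.insert l (inner.insert gp.1 1)
            else
              d.insert l (inner.insert gp.1 (inner.getD gp.1 0 + 1))
        ) d) d) PySem.Dict.empty
  d.items.map (fun p => (p.1, p.2.items))

-- ===== PORT B =====
def get_attr_tree_reverse_alt (attr_tree : List (String × List (List String))) : List (String × List (String × Int)) :=
  let pairs : List (String × String) :=
    attr_tree.flatMap (fun gp => gp.2.flatMap (fun l_attrs => l_attrs.map (fun l => (l, gp.1))))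
  let counts : PySem.Dict (String × String) Int :=
    pairs.foldl (fun d p => d.insert p (d.getD p 0 + 1)) PySem.Dict.empty
  let result : PySem.Dict String (PySem.Dict String Int) :=
    counts.items.foldl (fun r q =>
      let r1 := r.setdefault q.1.1 PySem.Dict.empty
      r1.insert q.1.1 ((r1.getD q.1.1 PySem.Dict.empty).insert q.1.2 q.2)) PySem.Dict.empty
  result.items.map (fun p => (p.1, p.2.items))

-- ===== PRECONDITION & SPEC =====
def Spec_get_attr_tree_reverse (attr_tree : List (String × List (List String))) (out : List (String × List (String × Int))) : Prop := out = get_attr_tree_reverse_alt attr_tree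
instance (attr_tree : List (String × List (List String))) (out : List (String × List (String × Int))) : Decidable (Spec_get_attr_tree_reverse attr_tree out) := by unfold Spec_get_attr_tree_reverse; infer_instance

-- ===== CLAIM (what is proved, stated in full; the proofs are below) =====
def Claim_equal_get_attr_tree_reverse : Prop := ∀ (attr_tree : List (String × List (List String))), Dom_get_attr_tree_reverse attr_tree → Spec_get_attr_tree_reverse attr_tree (get_attr_tree_reverse attr_tree)

-- ===== LEMMAS AND PROOFS =====

-- the uniform step A's three branches all compute
def ustep (d : PySem.Dict String (PySem.Dict String Int)) (p : String × String) :
    PySem.Dict String (PySem.Dict String Int) :=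
  d.insert p.1 ((d.getD p.1 PySem.Dict.empty).insert p.2 ((d.getD p.1 PySem.Dict.empty).getD p.2 0 + 1))

-- canonical description pieces
def gsetL (ps : List (String × String)) (l : String) : List String :=
  PySem.Set.ofList ((ps.filter (fun p => p.1 == l)).map Prod.snd)

def innerL (ps : List (String × String)) (l : String) : List (String × Int) :=
  (gsetL ps l).map (fun g => (g, (ps.count (l, g) : Int)))

def canonD (ps : List (String × String)) : List (String × PySem.Dict String Int) :=
  (PySem.Set.ofList (ps.map Prod.fst)).map (fun l => (l, PySem.Dict.mk (innerL ps l)))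

theorem stepA_eq_ustep (d : PySem.Dict String (PySem.Dict String Int)) (l g : String) :
    (if d.contains l = false then
        d.insert l (PySem.Dict.empty.insert g 1)
      else
        let inner := d.getD l PySem.Dict.empty
        if inner.contains g = false then
          d.insert l (inner.insert g 1)
        else
          d.insert l (inner.insert g (inner.getD g 0 + 1))) = ustep d (l, g) := by
  unfold ustep
  dsimp only
  by_cases hl : d.contains l = false
  · rw [if_pos hl, PySem.Dict.getD_of_not_contains _ _ hl, PySem.Dict.getD_empty]
    norm_num
  · rw [if_neg hl]
    by_cases hg : (d.getD l PySem.Dict.empty).contains g = false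
    · rw [if_pos hg, PySem.Dict.getD_of_not_contains _ _ hg]
      norm_num
    · rw [if_neg hg]

theorem filter_eq_nil_of_not_mem_fst (ps : List (String × String)) (l : String)
    (h : l ∉ ps.map Prod.fst) : ps.filter (fun p => p.1 == l) = [] := by
  rw [List.filter_eq_nil_iff]
  intro p hp hbeq
  exact h (List.mem_map.2 ⟨p, hp, by simpa using hbeq⟩)

theorem count_eq_zero_of_not_mem_fst (ps : List (String × String)) (l g : String)
    (h : l ∉ ps.map Prod.fst) : ps.count (l, g) = 0 := by
  rw [List.count_eq_zero]
  intro hmem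
  exact h (List.mem_map.2 ⟨(l, g), hmem, rfl⟩)

theorem keys_mk_innerL (ps : List (String × String)) (l : String) :
    (PySem.Dict.mk (innerL ps l)).keys = gsetL ps l := by
  unfold innerL
  rw [PySem.Dict.keys_mk, List.map_map]
  exact List.map_id _

theorem getD_mk_innerL_count (ps : List (String × String)) (l g : String) :
    (PySem.Dict.mk (innerL ps l)).getD g 0 = (ps.count (l, g) : Int) := by
  by_cases hg : g ∈ gsetL ps l
  · exact PySem.Dict.getD_of_mem_items _
      (by exact List.mem_map.2 ⟨g, hg, rfl⟩)
      (by rw [keys_mk_innerL]; exact PySem.Set.nodup_ofList _) 0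
  · have hc : (PySem.Dict.mk (innerL ps l)).contains g = false := by
      rw [← Bool.not_eq_true, PySem.Dict.contains_iff_mem_keys, keys_mk_innerL]
      exact hg
    rw [PySem.Dict.getD_of_not_contains _ _ hc]
    have : ps.count (l, g) = 0 := by
      rw [List.count_eq_zero]
      intro hmem
      exact hg (by
        unfold gsetL
        exact (PySem.Set.mem_ofList _ _).2 (List.mem_map.2 ⟨(l, g), List.mem_filter.2 ⟨hmem, by simp⟩, rfl⟩))
    simp [this]

theorem innerL_append_ne (ps : List (String × String)) (l g l' : String) (h : l' ≠ l) :
    innerL (ps ++ [(l, g)]) l' = innerL ps l' := by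
  unfold innerL gsetL
  have hfilter : (ps ++ [(l, g)]).filter (fun p => p.1 == l') = ps.filter (fun p => p.1 == l') := by
    rw [List.filter_append]
    simp [Ne.symm h]
  rw [hfilter]
  apply List.map_congr_left
  intro g' _
  have hne : (l, g) ≠ (l', g') := by simp [Ne.symm h]
  have : (ps ++ [(l, g)]).count (l', g') = ps.count (l', g') := by
    rw [List.count_append, List.count_singleton]
    simp [hne]
  rw [this]

theorem insert_mk_innerL (ps : List (String × String)) (l g : String) :
    (PySem.Dict.mk (innerL ps l)).insert g ((ps.count (l, g) : Int) + 1)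
      = PySem.Dict.mk (innerL (ps ++ [(l, g)]) l) := by
  apply PySem.Dict.ext
  have hfilter : (ps ++ [(l, g)]).filter (fun p => p.1 == l) = ps.filter (fun p => p.1 == l) ++ [(l, g)] := by
    rw [List.filter_append]; simp
  have hgset : gsetL (ps ++ [(l, g)]) l = PySem.Set.add (gsetL ps l) g := by
    unfold gsetL
    rw [hfilter, List.map_append, PySem.Set.ofList_append]
    simp [PySem.Set.update]
  have hcount_ne : ∀ g', g' ≠ g → (ps ++ [(l, g)]).count (l, g') = ps.count (l, g') := by
    intro g' hne
    rw [List.count_append]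
    simp [Ne.symm hne]
  by_cases hg : g ∈ gsetL ps l
  · have hc : (PySem.Dict.mk (innerL ps l)).contains g = true := by
      rw [PySem.Dict.contains_iff_mem_keys, keys_mk_innerL]; exact hg
    rw [PySem.Dict.items_insert_of_contains _ _ hc]
    show (innerL ps l).map _ = innerL (ps ++ [(l, g)]) l
    unfold innerL
    rw [hgset, PySem.Set.add_of_mem hg, List.map_map]
    apply List.map_congr_left
    intro g' hg'
    by_cases he : g' = g
    · subst he
      simp
    · simp [he, hcount_ne g' he]
  · have hc : (PySem.Dict.mk (innerL ps l)).contains g = false := by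
      rw [← Bool.not_eq_true, PySem.Dict.contains_iff_mem_keys, keys_mk_innerL]; exact hg
    rw [PySem.Dict.items_insert_of_not_contains _ _ hc]
    show innerL ps l ++ [(g, (ps.count (l, g) : Int) + 1)] = innerL (ps ++ [(l, g)]) l
    unfold innerL
    rw [hgset, PySem.Set.add_of_not_mem hg, List.map_append]
    congr 1
    · apply List.map_congr_left
      intro g' hg'
      have hne : g' ≠ g := fun h => hg (h ▸ hg')
      simp [hcount_ne g' hne]
    · simp

theorem foldl_ustep_items (ps : List (String × String)) :
    (ps.foldl ustep PySem.Dict.empty).items = canonD ps := by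
  induction ps using List.reverseRecOn with
  | nil => rfl
  | append_singleton ps p ih =>
    obtain ⟨l, g⟩ := p
    rw [List.foldl_append, List.foldl_cons, List.foldl_nil]
    set D := ps.foldl ustep PySem.Dict.empty with hD
    have hkeys : D.keys = PySem.Set.ofList (ps.map Prod.fst) := by
      simp only [PySem.Dict.keys, ih, canonD, List.map_map]
      exact List.map_id _
    have hnodup : D.keys.Nodup := hkeys ▸ PySem.Set.nodup_ofList _
    have hmapfst : (ps ++ [(l, g)]).map Prod.fst = ps.map Prod.fst ++ [l] := by simp
    by_cases hl : l ∈ ps.map Prod.fst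
    · have hc : D.contains l = true := by
        rw [PySem.Dict.contains_iff_mem_keys, hkeys]
        exact (PySem.Set.mem_ofList _ _).2 hl
      have hinner : D.getD l PySem.Dict.empty = PySem.Dict.mk (innerL ps l) :=
        PySem.Dict.getD_of_mem_items D
          (by rw [ih]; exact List.mem_map.2 ⟨l, (PySem.Set.mem_ofList _ _).2 hl, rfl⟩) hnodup _
      show (D.insert l _).items = _
      rw [PySem.Dict.items_insert_of_contains _ _ hc, ih]
      simp only [hinner, getD_mk_innerL_count, insert_mk_innerL]
      unfold canonD
      rw [List.map_map, hmapfst, PySem.Set.ofList_append_singleton,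
        PySem.Set.add_of_mem ((PySem.Set.mem_ofList _ _).2 hl)]
      apply List.map_congr_left
      intro l' hl'
      by_cases he : l' = l
      · subst he; simp
      · simp [he, innerL_append_ne ps l g l' he]
    · have hc : D.contains l = false := by
        rw [← Bool.not_eq_true, PySem.Dict.contains_iff_mem_keys, hkeys]
        simpa using fun h => hl ((PySem.Set.mem_ofList _ _).1 h)
      have hinner : D.getD l PySem.Dict.empty = PySem.Dict.empty :=
        PySem.Dict.getD_of_not_contains _ _ hc
      have hempty : PySem.Dict.empty = PySem.Dict.mk (innerL ps l) := by
        unfold innerL gsetL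
        rw [filter_eq_nil_of_not_mem_fst ps l hl]
        rfl
      have hone : (1 : Int) = (ps.count (l, g) : Int) + 1 := by
        rw [count_eq_zero_of_not_mem_fst ps l g hl]; simp
      show (D.insert l _).items = _
      rw [PySem.Dict.items_insert_of_not_contains _ _ hc, ih]
      rw [hinner, PySem.Dict.getD_empty]
      rw [show ((0 : Int) + 1) = (1 : Int) by ring, hempty, hone, insert_mk_innerL]
      unfold canonD
      rw [hmapfst, PySem.Set.ofList_append_singleton,
        PySem.Set.add_of_not_mem (fun h => hl ((PySem.Set.mem_ofList _ _).1 h)),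
        List.map_append]
      congr 1
      apply List.map_congr_left
      intro l' hl'
      have hne : l' ≠ l := fun h => hl (h ▸ ((PySem.Set.mem_ofList _ _).1 hl'))
      simp [innerL_append_ne ps l g l' hne]


-- ===== B-side lemmas =====

-- B's regroup step, insert form
def rstep (r : PySem.Dict String (PySem.Dict String Int)) (q : (String × String) × Int) :
    PySem.Dict String (PySem.Dict String Int) :=
  r.insert q.1.1 ((r.getD q.1.1 PySem.Dict.empty).insert q.1.2 q.2)

theorem sstep_eq_rstep (r : PySem.Dict String (PySem.Dict String Int)) (q : (String × String) × Int) :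
    (let r1 := r.setdefault q.1.1 PySem.Dict.empty
     r1.insert q.1.1 ((r1.getD q.1.1 PySem.Dict.empty).insert q.1.2 q.2)) = rstep r q := by
  unfold rstep
  dsimp only
  by_cases hc : r.contains q.1.1 = true
  · rw [PySem.Dict.setdefault_of_contains _ _ hc]
  · have hc' : r.contains q.1.1 = false := by simpa using hc
    rw [PySem.Dict.setdefault_of_not_contains _ _ hc', PySem.Dict.getD_insert_self,
      PySem.Dict.insert_insert_self, PySem.Dict.getD_of_not_contains _ _ hc']

def groupedD (qs : List ((String × String) × Int)) : List (String × PySem.Dict String Int) :=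
  (PySem.Set.ofList (qs.map (fun q => q.1.1))).map (fun l =>
    (l, PySem.Dict.mk ((qs.filter (fun q => q.1.1 == l)).map (fun q => (q.1.2, q.2)))))

theorem regroup_items (qs : List ((String × String) × Int)) (h : (qs.map Prod.fst).Nodup) :
    (qs.foldl rstep PySem.Dict.empty).items = groupedD qs := by
  induction qs using List.reverseRecOn with
  | nil => rfl
  | append_singleton qs q ih =>
    obtain ⟨⟨l, g⟩, c⟩ := q
    rw [show (qs ++ [((l, g), c)]).map Prod.fst = qs.map Prod.fst ++ [(l, g)] by simp,
      List.nodup_append] at h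
    obtain ⟨hnd, hsing, hdisj⟩ := h
    have hfresh : (l, g) ∉ qs.map Prod.fst := fun hm => hdisj _ hm (l, g) (by simp) rfl
    specialize ih hnd
    rw [List.foldl_append, List.foldl_cons, List.foldl_nil]
    set R := qs.foldl rstep PySem.Dict.empty with hR
    have hkeys : R.keys = PySem.Set.ofList (qs.map (fun q => q.1.1)) := by
      simp only [PySem.Dict.keys, ih, groupedD, List.map_map]
      exact List.map_id _
    have hnodupk : R.keys.Nodup := hkeys ▸ PySem.Set.nodup_ofList _
    have hmapfst1 : (qs ++ [((l, g), c)]).map (fun q => q.1.1) = qs.map (fun q => q.1.1) ++ [l] := by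
      simp
    unfold rstep
    dsimp only
    by_cases hl : l ∈ qs.map (fun q => q.1.1)
    · have hc : R.contains l = true := by
        rw [PySem.Dict.contains_iff_mem_keys, hkeys]
        exact (PySem.Set.mem_ofList _ _).2 hl
      have hinner : R.getD l PySem.Dict.empty
          = PySem.Dict.mk ((qs.filter (fun q => q.1.1 == l)).map (fun q => (q.1.2, q.2))) :=
        PySem.Dict.getD_of_mem_items R
          (by rw [ih]; exact List.mem_map.2 ⟨l, (PySem.Set.mem_ofList _ _).2 hl, rfl⟩) hnodupk _
      have hg : (PySem.Dict.mk ((qs.filter (fun q => q.1.1 == l)).map (fun q => (q.1.2, q.2)))).contains g = false := by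
        rw [← Bool.not_eq_true, PySem.Dict.contains_iff_mem_keys, PySem.Dict.keys_mk, List.map_map]
        intro hmem
        obtain ⟨q, hqmem, hq2⟩ := List.mem_map.1 hmem
        obtain ⟨hqqs, hq1⟩ := List.mem_filter.1 hqmem
        have hq1' : q.1.1 = l := by simpa using hq1
        have : q.1 = (l, g) := by
          obtain ⟨⟨a, b⟩, c'⟩ := q
          simp_all
        exact hfresh (this ▸ List.mem_map.2 ⟨q, hqqs, rfl⟩)
      have hins : (PySem.Dict.mk ((qs.filter (fun q => q.1.1 == l)).map (fun q => (q.1.2, q.2)))).insert g c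
          = PySem.Dict.mk (((qs.filter (fun q => q.1.1 == l)).map (fun q => (q.1.2, q.2))) ++ [(g, c)]) := by
        apply PySem.Dict.ext
        rw [PySem.Dict.items_insert_of_not_contains _ _ hg]
      rw [PySem.Dict.items_insert_of_contains _ _ hc, ih, hinner, hins]
      unfold groupedD
      rw [List.map_map, hmapfst1, PySem.Set.ofList_append_singleton,
        PySem.Set.add_of_mem ((PySem.Set.mem_ofList _ _).2 hl)]
      apply List.map_congr_left
      intro l' hl'
      by_cases he : l' = l
      · subst he
        simp [List.filter_append]
      · have hfil : (qs ++ [((l, g), c)]).filter (fun q => q.1.1 == l')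
            = qs.filter (fun q => q.1.1 == l') := by
          rw [List.filter_append]
          simp [Ne.symm he]
        simp [he, hfil]
    · have hc : R.contains l = false := by
        rw [← Bool.not_eq_true, PySem.Dict.contains_iff_mem_keys, hkeys]
        simpa using fun hm => hl ((PySem.Set.mem_ofList _ _).1 hm)
      have hinner : R.getD l PySem.Dict.empty = PySem.Dict.empty :=
        PySem.Dict.getD_of_not_contains _ _ hc
      rw [PySem.Dict.items_insert_of_not_contains _ _ hc, ih, hinner]
      unfold groupedD
      rw [hmapfst1, PySem.Set.ofList_append_singleton,
        PySem.Set.add_of_not_mem (fun hm => hl ((PySem.Set.mem_ofList _ _).1 hm)),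
        List.map_append]
      congr 1
      · apply List.map_congr_left
        intro l' hl'
        have hne : l' ≠ l := fun hh => hl (hh ▸ ((PySem.Set.mem_ofList _ _).1 hl'))
        have hfil : (qs ++ [((l, g), c)]).filter (fun q => q.1.1 == l')
            = qs.filter (fun q => q.1.1 == l') := by
          rw [List.filter_append]
          simp [Ne.symm hne]
        simp [hfil]
      · have hfil0 : qs.filter (fun q => q.1.1 == l) = [] := by
          rw [List.filter_eq_nil_iff]
          intro q hq hbeq
          exact hl (List.mem_map.2 ⟨q, hq, by simpa using hbeq⟩)
        have hfil : (qs ++ [((l, g), c)]).filter (fun q => q.1.1 == l) = [((l, g), c)] := by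
          rw [List.filter_append, hfil0]
          simp
        have hone : PySem.Dict.empty.insert g c = PySem.Dict.mk [(g, c)] := by
          apply PySem.Dict.ext
          rw [PySem.Dict.items_insert_of_not_contains _ _ (PySem.Dict.contains_empty g)]
          rfl
        simp [hfil0, hone]
      
theorem ofList_map_ofList {α β : Type} [BEq α] [LawfulBEq α] [BEq β] [LawfulBEq β]
    (xs : List α) (f : α → β) :
    PySem.Set.ofList ((PySem.Set.ofList xs).map f) = PySem.Set.ofList (xs.map f) := by
  induction xs using List.reverseRecOn with
  | nil => rfl
  | append_singleton xs x ih =>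
    have hL : PySem.Set.ofList ((PySem.Set.ofList (xs ++ [x])).map f)
        = PySem.Set.add (PySem.Set.ofList ((PySem.Set.ofList xs).map f)) (f x) := by
      rw [PySem.Set.ofList_append_singleton]
      by_cases hx : x ∈ PySem.Set.ofList xs
      · rw [PySem.Set.add_of_mem hx, PySem.Set.add_of_mem]
        exact (PySem.Set.mem_ofList _ _).2 (List.mem_map_of_mem hx)
      · rw [PySem.Set.add_of_not_mem hx, List.map_append]
        simp only [List.map_cons, List.map_nil]
        exact PySem.Set.ofList_append_singleton _ _
    have hR : PySem.Set.ofList (List.map f (xs ++ [x]))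
        = PySem.Set.add (PySem.Set.ofList (List.map f xs)) (f x) := by
      rw [List.map_append]
      simp only [List.map_cons, List.map_nil]
      exact PySem.Set.ofList_append_singleton _ _
    rw [hL, hR, ih]

theorem filter_ofList_pairs (ps : List (String × String)) (l : String) :
    (PySem.Set.ofList ps).filter (fun p => p.1 == l)
      = (PySem.Set.ofList ((ps.filter (fun p => p.1 == l)).map Prod.snd)).map (fun g => (l, g)) := by
  induction ps using List.reverseRecOn with
  | nil => rfl
  | append_singleton ps p ih =>
    obtain ⟨l0, g0⟩ := p
    rw [PySem.Set.ofList_append_singleton]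
    by_cases hl0 : l0 = l
    · subst hl0
      have hfil : (ps ++ [(l0, g0)]).filter (fun p => p.1 == l0)
          = ps.filter (fun p => p.1 == l0) ++ [(l0, g0)] := by
        rw [List.filter_append]
        simp
      rw [hfil, List.map_append]
      simp only [List.map_cons, List.map_nil]
      rw [PySem.Set.ofList_append_singleton]
      by_cases hg : g0 ∈ PySem.Set.ofList ((ps.filter (fun p => p.1 == l0)).map Prod.snd)
      · have hp : (l0, g0) ∈ PySem.Set.ofList ps := by
          obtain ⟨q, hqmem, hqs⟩ := List.mem_map.1 ((PySem.Set.mem_ofList _ _).1 hg)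
          obtain ⟨hqps, hq1⟩ := List.mem_filter.1 hqmem
          have : q = (l0, g0) := by
            obtain ⟨a, b⟩ := q
            simp_all
          exact (PySem.Set.mem_ofList _ _).2 (this ▸ hqps)
        rw [PySem.Set.add_of_mem hp, PySem.Set.add_of_mem hg, ih]
      · have hp : (l0, g0) ∉ PySem.Set.ofList ps := by
          intro hmem
          exact hg ((PySem.Set.mem_ofList _ _).2 (List.mem_map.2
            ⟨(l0, g0), List.mem_filter.2 ⟨(PySem.Set.mem_ofList _ _).1 hmem, by simp⟩, rfl⟩))
        rw [PySem.Set.add_of_not_mem hp, List.filter_append, ih, PySem.Set.add_of_not_mem hg, List.map_append]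
        simp
    · have hfil : (ps ++ [(l0, g0)]).filter (fun p => p.1 == l)
          = ps.filter (fun p => p.1 == l) := by
        rw [List.filter_append]
        simp [hl0]
      by_cases hp : (l0, g0) ∈ PySem.Set.ofList ps
      · rw [PySem.Set.add_of_mem hp, hfil, ih]
      · rw [PySem.Set.add_of_not_mem hp, hfil, List.filter_append, ih]
        simp [hl0]

theorem regroup_counter_eq_canonD (ps : List (String × String)) :
    ((((PySem.Set.ofList ps).map (fun p => (p, (ps.count p : Int)))).foldl rstep
        PySem.Dict.empty)).items = canonD ps := by
  have hnd : ((((PySem.Set.ofList ps).map (fun p => (p, (ps.count p : Int)))).map Prod.fst)).Nodup := by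
    rw [List.map_map]
    have hcomp : (Prod.fst ∘ fun p : String × String => (p, (ps.count p : Int))) = id := rfl
    rw [hcomp, List.map_id]
    exact PySem.Set.nodup_ofList ps
  rw [regroup_items _ hnd]
  unfold groupedD canonD
  rw [List.map_map]
  have houter : (((fun q : (String × String) × Int => q.1.1) ∘
      fun p : String × String => (p, (ps.count p : Int)))) = Prod.fst := rfl
  rw [houter, ofList_map_ofList]
  apply List.map_congr_left
  intro l _
  have hfil : ((PySem.Set.ofList ps).map (fun p => (p, (ps.count p : Int)))).filter
        (fun q => q.1.1 == l)
      = ((PySem.Set.ofList ps).filter (fun p => p.1 == l)).map (fun p => (p, (ps.count p : Int))) := by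
    rw [List.filter_map]
    rfl
  rw [hfil, filter_ofList_pairs, List.map_map, List.map_map]
  rfl

theorem portB_eq_canonMap (attr_tree : List (String × List (List String))) :
    get_attr_tree_reverse_alt attr_tree =
      (canonD (attr_tree.flatMap (fun gp => gp.2.flatMap (fun l_attrs => l_attrs.map (fun l => (l, gp.1)))))).map
        (fun p => (p.1, p.2.items)) := by
  unfold get_attr_tree_reverse_alt
  dsimp only
  congr 1
  rw [show (fun (d : PySem.Dict (String × String) Int) (p : String × String) =>
        d.insert p (d.getD p 0 + 1)) = (fun d p => d.insert p (d.getD p 0 + 1)) from rfl,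
    PySem.Dict.foldl_insert_getD_add_one_eq_counter, PySem.Dict.items_counter]
  rw [show (fun (r : PySem.Dict String (PySem.Dict String Int)) (q : (String × String) × Int) =>
        let r1 := r.setdefault q.1.1 PySem.Dict.empty
        r1.insert q.1.1 ((r1.getD q.1.1 PySem.Dict.empty).insert q.1.2 q.2)) = rstep from
    funext fun r => funext fun q => sstep_eq_rstep r q]
  exact regroup_counter_eq_canonD _

theorem portA_eq_foldl_ustep (attr_tree : List (String × List (List String))) :
    get_attr_tree_reverse attr_tree =
      ((attr_tree.flatMap (fun gp => gp.2.flatMap (fun l_attrs => l_attrs.map (fun l => (l, gp.1))))).foldl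
        ustep PySem.Dict.empty).items.map (fun p => (p.1, p.2.items)) := by
  simp only [get_attr_tree_reverse, List.foldl_flatMap, List.foldl_map, stepA_eq_ustep]

-- ===== VERDICT (by name: the statement is the Claim_ definition above) =====
theorem get_attr_tree_reverse_spec : Claim_equal_get_attr_tree_reverse := by
  intro attr_tree _
  unfold Spec_get_attr_tree_reverse
  rw [portA_eq_foldl_ustep, foldl_ustep_items, portB_eq_canonMap]
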